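-- pv_equiv track=rewrite | github.com/SpringTimeSoftware/SpriCO | pyrit/backend/sprico/integrations/promptfoo/catalog.py | _plugin_in_group
-- ===== SOURCE A (Python) =====
-- def _plugin_in_group(plugin_id: str, group_id: str) -> bool:
--     lowered = plugin_id.lower()
--     if group_id == "security_access":
--         return any(token in lowered for token in ("bola", "bfla", "rbac", "auth", "access", "ssrf", "sql", "shell", "debug", "agency"))
--     if group_id == "trust_safety":
--         return any(token in lowered for token in ("harmful", "hate", "violence", "self-harm", "tox", "bias", "jailbreak"))
--     if group_id == "medical_healthcare":
--         return any(token in lowered for token in ("medical", "health", "phi", "pii", "privacy"))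
--     if group_id == "compliance_legal":
--         return any(token in lowered for token in ("legal", "contract", "compliance", "policy"))
--     if group_id == "dataset_rag":
--         return any(token in lowered for token in ("rag", "retriev", "dataset", "poison", "exfil", "prompt-extraction", "session"))
--     if group_id == "brand_custom":
--         return True
--     return False
-- ===== SOURCE B (Python) =====
-- # Inverted index: one flat (token, group) list; classify the plugin into the
-- # set of ALL groups it matches in a single pass, then answer by membership.
-- _TOKEN_GROUP = (
--     ("bola", "security_access"), ("bfla", "security_access"), ("rbac", "security_access"),
--     ("auth", "security_access"), ("access", "security_access"), ("ssrf", "security_access"),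
--     ("sql", "security_access"), ("shell", "security_access"), ("debug", "security_access"),
--     ("agency", "security_access"),
--     ("harmful", "trust_safety"), ("hate", "trust_safety"), ("violence", "trust_safety"),
--     ("self-harm", "trust_safety"), ("tox", "trust_safety"), ("bias", "trust_safety"),
--     ("jailbreak", "trust_safety"),
--     ("medical", "medical_healthcare"), ("health", "medical_healthcare"),
--     ("phi", "medical_healthcare"), ("pii", "medical_healthcare"), ("privacy", "medical_healthcare"),
--     ("legal", "compliance_legal"), ("contract", "compliance_legal"),
--     ("compliance", "compliance_legal"), ("policy", "compliance_legal"),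
--     ("rag", "dataset_rag"), ("retriev", "dataset_rag"), ("dataset", "dataset_rag"),
--     ("poison", "dataset_rag"), ("exfil", "dataset_rag"), ("prompt-extraction", "dataset_rag"),
--     ("session", "dataset_rag"),
-- )
--
-- def _plugin_in_group(plugin_id: str, group_id: str) -> bool:
--     lowered = plugin_id.lower()
--     groups = {"brand_custom"}          # matches every plugin
--     for token, group in _TOKEN_GROUP:
--         if token in lowered:
--             groups.add(group)
--     return group_id in groups
-- ===== Notes on version B (the rewrite author's own statement) =====
-- stated objective: alternative
-- what changed: Inverts the data: instead of dispatching on group_id and scanning that group's token tuple, B keeps one flat (token, group) inverted index, classifies the plugin into the full set of matching groups in a single pass over all tokens, and answers by set membership of group_id.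
import Mathlib
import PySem

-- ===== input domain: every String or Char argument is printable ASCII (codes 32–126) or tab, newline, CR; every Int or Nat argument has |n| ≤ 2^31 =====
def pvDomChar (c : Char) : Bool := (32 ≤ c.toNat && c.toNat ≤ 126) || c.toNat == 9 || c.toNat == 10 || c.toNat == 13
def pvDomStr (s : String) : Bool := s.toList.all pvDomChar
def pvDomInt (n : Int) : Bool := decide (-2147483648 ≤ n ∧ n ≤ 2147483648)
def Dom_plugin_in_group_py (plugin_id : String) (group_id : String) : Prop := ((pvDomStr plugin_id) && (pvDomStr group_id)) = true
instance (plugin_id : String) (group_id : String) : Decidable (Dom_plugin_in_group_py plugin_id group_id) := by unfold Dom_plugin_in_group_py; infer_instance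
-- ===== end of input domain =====

-- B inverts the data: one flat (token, group) index, a single pass classifying the plugin into the set of all matching groups, then a membership test; objective: alternative.

-- ===== PORT A =====
def plugin_in_group_py (plugin_id : String) (group_id : String) : Bool :=
  let lowered := PySem.Str.lower plugin_id
  if group_id == "security_access" then
    ["bola", "bfla", "rbac", "auth", "access", "ssrf", "sql", "shell", "debug", "agency"].any
      (fun token => PySem.Str.isIn token lowered)
  else if group_id == "trust_safety" then
    ["harmful", "hate", "violence", "self-harm", "tox", "bias", "jailbreak"].any
      (fun token => PySem.Str.isIn token lowered)
  else if group_id == "medical_healthcare" then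
    ["medical", "health", "phi", "pii", "privacy"].any
      (fun token => PySem.Str.isIn token lowered)
  else if group_id == "compliance_legal" then
    ["legal", "contract", "compliance", "policy"].any
      (fun token => PySem.Str.isIn token lowered)
  else if group_id == "dataset_rag" then
    ["rag", "retriev", "dataset", "poison", "exfil", "prompt-extraction", "session"].any
      (fun token => PySem.Str.isIn token lowered)
  else if group_id == "brand_custom" then
    true
  else
    false

-- ===== PORT B =====
-- the flat inverted index (token, group)
def pvTokenGroup : List (String × String) :=
  [("bola", "security_access"), ("bfla", "security_access"), ("rbac", "security_access"),
   ("auth", "security_access"), ("access", "security_access"), ("ssrf", "security_access"),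
   ("sql", "security_access"), ("shell", "security_access"), ("debug", "security_access"),
   ("agency", "security_access"),
   ("harmful", "trust_safety"), ("hate", "trust_safety"), ("violence", "trust_safety"),
   ("self-harm", "trust_safety"), ("tox", "trust_safety"), ("bias", "trust_safety"),
   ("jailbreak", "trust_safety"),
   ("medical", "medical_healthcare"), ("health", "medical_healthcare"),
   ("phi", "medical_healthcare"), ("pii", "medical_healthcare"), ("privacy", "medical_healthcare"),
   ("legal", "compliance_legal"), ("contract", "compliance_legal"),
   ("compliance", "compliance_legal"), ("policy", "compliance_legal"),
   ("rag", "dataset_rag"), ("retriev", "dataset_rag"), ("dataset", "dataset_rag"),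
   ("poison", "dataset_rag"), ("exfil", "dataset_rag"), ("prompt-extraction", "dataset_rag"),
   ("session", "dataset_rag")]

def plugin_in_group_py_alt (plugin_id : String) (group_id : String) : Bool :=
  let lowered := PySem.Str.lower plugin_id
  let groups : PySem.Set String :=
    pvTokenGroup.foldl
      (fun s tg => if PySem.Str.isIn tg.1 lowered then PySem.Set.add s tg.2 else s)
      (PySem.Set.ofList ["brand_custom"])
  PySem.Set.contains groups group_id

-- ===== PRECONDITION & SPEC =====
def Spec_plugin_in_group_py (plugin_id : String) (group_id : String) (out : Bool) : Prop := out = plugin_in_group_py_alt plugin_id group_id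
instance (plugin_id : String) (group_id : String) (out : Bool) : Decidable (Spec_plugin_in_group_py plugin_id group_id out) := by unfold Spec_plugin_in_group_py; infer_instance

-- ===== CLAIM =====
def Claim_equal_plugin_in_group_py : Prop := ∀ (plugin_id : String) (group_id : String), Dom_plugin_in_group_py plugin_id group_id → Spec_plugin_in_group_py plugin_id group_id (plugin_in_group_py plugin_id group_id)

-- ===== LEMMAS AND PROOFS =====
-- membership in the classifier's fold = membership in the seed, or some index entry
-- whose token occurs in `lowered` carries that group
theorem pv_contains_foldl (l : List (String × String)) (init : PySem.Set String)
    (lowered g : String) :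
    PySem.Set.contains
      (l.foldl (fun s tg => if PySem.Str.isIn tg.1 lowered then PySem.Set.add s tg.2 else s) init) g
    = (PySem.Set.contains init g || l.any (fun tg => PySem.Str.isIn tg.1 lowered && tg.2 == g)) := by
  induction l generalizing init with
  | nil => simp
  | cons hd tl ih =>
    by_cases h : PySem.Str.isIn hd.1 lowered = true
    · rw [List.foldl_cons, if_pos h, ih, List.any_cons, h]
      have hb : (hd.2 == g) = decide (g = hd.2) := by
        by_cases hg : g = hd.2
        · subst hg; simp
        · simp only [hg, decide_false]
          simp only [beq_eq_false_iff_ne, ne_eq]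
          exact fun hh => hg hh.symm
      simp [PySem.Set.mem_add, hb, Bool.or_comm, Bool.or_left_comm, Bool.or_assoc]
    · rw [List.foldl_cons, if_neg h, ih, List.any_cons,
          Bool.not_eq_true _ |>.mp h]
      simp

-- ===== VERDICT =====
theorem plugin_in_group_py_spec : Claim_equal_plugin_in_group_py := by
  intro p g _
  unfold Spec_plugin_in_group_py plugin_in_group_py plugin_in_group_py_alt
  rw [pv_contains_foldl]
  by_cases h1 : g = "security_access"
  · subst h1; simp [pvTokenGroup]
  · by_cases h2 : g = "trust_safety"
    · subst h2; simp [pvTokenGroup]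
    · by_cases h3 : g = "medical_healthcare"
      · subst h3; simp [pvTokenGroup]
      · by_cases h4 : g = "compliance_legal"
        · subst h4; simp [pvTokenGroup]
        · by_cases h5 : g = "dataset_rag"
          · subst h5; simp [pvTokenGroup]
          · by_cases h6 : g = "brand_custom"
            · subst h6; simp [pvTokenGroup]
            · have e1 : ("security_access" == g) = false := by simp; exact fun hh => h1 hh.symm
              have e2 : ("trust_safety" == g) = false := by simp; exact fun hh => h2 hh.symm
              have e3 : ("medical_healthcare" == g) = false := by simp; exact fun hh => h3 hh.symm
              have e4 : ("compliance_legal" == g) = false := by simp; exact fun hh => h4 hh.symm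
              have e5 : ("dataset_rag" == g) = false := by simp; exact fun hh => h5 hh.symm
              simp [pvTokenGroup, h1, h2, h3, h4, h5, h6, e1, e2, e3, e4, e5,
                    PySem.Set.mem_ofList, Ne.symm]
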